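-- pv_equiv track=rewrite | github.com/LenaIdrisova/Lab3 | Лаб3.py | get_selected_items_list
-- ===== SOURCE A (Python) =====
-- def get_area_and_value(stuffdict):
--     area = [stuffdict[item][0] for item in stuffdict]
--     value = [stuffdict[item][1] for item in stuffdict]
--     return area, value
--
-- def get_memtable(stuffdict, A=9):
--     area, value = get_area_and_value(stuffdict)
--     n = len(value)
--
--     V = [[0 for a in range(A+1)] for i in range(n+1)]
--
--     for i in range(n + 1):
--         for a in range(A + 1):
--             if i == 0 or a == 0:
--                 V[i][a] = 0
--             elif area[i - 1] <= a:
--                 V[i][a] = max(value[i - 1] + V[i - 1][a-area[i-1]], V[i-1][a])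
--             else:
--                 V[i][a] = V[i - 1][a]
--     return V, area, value
--
-- def get_selected_items_list(stuffdict, A=9):
--     V, area, value, = get_memtable(stuffdict)
--     n = len(value)
--     res = V[n][A]
--     a = A
--     items_list = []
--
--     for i in range(n, 0, -1):
--         if res <= 0:
--             break
--         if res == V[i - 1][a]:
--             continue
--         else:
--             items_list.append((area[i - 1], value[i - 1]))
--             res -= value[i - 1]
--             a -= area[i - 1]
--
--     selected_stuff = []
--
--     for search in items_list:
--         for key, value in stuffdict.items():
--             if value == search:
--                 selected_stuff.append(key)
--
--     return selected_stuff
-- ===== SOURCE B (Python) =====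
-- def get_selected_items_list(stuffdict, A=9):
--     # Top-down memoized knapsack instead of A's bottom-up 2-D table; same
--     # skip-on-tie reconstruction and the same key-matching final pass.
--     area = [t[0] for t in stuffdict.values()]
--     value = [t[1] for t in stuffdict.values()]
--     n = len(area)
--     memo = {}
--
--     def solve(i, a):
--         if i == 0 or a == 0:
--             return 0
--         if (i, a) not in memo:
--             best = solve(i - 1, a)
--             if area[i - 1] <= a:
--                 best = max(best, value[i - 1] + solve(i - 1, a - area[i - 1]))
--             memo[(i, a)] = best
--         return memo[(i, a)]
--
--     res = solve(n, A)
--     a = A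
--     chosen = []
--     for i in range(n, 0, -1):
--         if res <= 0:
--             break
--         if res == solve(i - 1, a):
--             continue
--         chosen.append((area[i - 1], value[i - 1]))
--         res -= value[i - 1]
--         a -= area[i - 1]
--
--     return [key for t in chosen for key, val in stuffdict.items() if val == t]
-- ===== Notes on version B (the rewrite author's own statement) =====
-- stated objective: alternative
-- what changed: Replaces A's bottom-up (n+1)x10 DP table (get_memtable's nested fill loops plus list indexing) with a top-down recursive solve(i,a) memoized in a dict, computing only the states the reconstruction needs; the skip-on-tie reconstruction walk and the key-matching output pass are kept semantically identical.
-- intended difference: For -9 <= A <= -1 with some stored item whose area fits capacity A+10 and whose value is positive, A's negative-index wraparound on V[n][A] returns the selection for capacity A+10, while B returns the empty list - the intended result for a negative capacity. — e.g. on get_selected_items_list([("a", 1, 5)], -8): A returns ["a"], B returns []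
import Mathlib
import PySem

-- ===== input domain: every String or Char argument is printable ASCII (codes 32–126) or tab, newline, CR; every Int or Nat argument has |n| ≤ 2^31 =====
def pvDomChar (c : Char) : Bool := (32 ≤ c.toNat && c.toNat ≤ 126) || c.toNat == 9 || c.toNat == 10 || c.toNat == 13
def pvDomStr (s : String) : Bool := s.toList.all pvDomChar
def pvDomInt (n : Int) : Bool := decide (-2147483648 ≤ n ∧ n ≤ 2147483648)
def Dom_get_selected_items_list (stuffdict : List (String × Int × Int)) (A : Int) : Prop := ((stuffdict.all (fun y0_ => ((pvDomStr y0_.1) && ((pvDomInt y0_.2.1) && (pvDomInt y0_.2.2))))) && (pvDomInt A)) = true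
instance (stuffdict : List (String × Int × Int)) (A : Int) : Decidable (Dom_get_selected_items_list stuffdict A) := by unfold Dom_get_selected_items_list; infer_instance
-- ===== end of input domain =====

-- B replaces A's bottom-up (n+1)×10 table with top-down memoized recursion (dict-cached solve),
-- keeping A's skip-on-tie reconstruction and key-matching output pass (objective: alternative).


-- ===== PORT A =====

-- V[i][a] (indices here always satisfy 0 ≤ i < len V, 0 ≤ a; default only hit outside Pre_)
def pvGet2 (V : List (List Int)) (i a : Int) : Int :=
  PySem.List.pyGetD (PySem.List.pyGetD V i []) a 0

-- V[i][a] = x (exact for 0 ≤ i < len V, 0 ≤ a < len V[i], which always holds at the call sites)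
def pvSet2 (V : List (List Int)) (i a x : Int) : List (List Int) :=
  V.set i.toNat ((PySem.List.pyGetD V i []).set a.toNat x)

-- get_area_and_value: [stuffdict[item][0] for item in stuffdict], same with [1]
def pvAreaA (d : PySem.Dict String (Int × Int)) : List Int :=
  d.keys.map (fun k => ((d.get? k).getD (0, 0)).1)
def pvValueA (d : PySem.Dict String (Int × Int)) : List Int :=
  d.keys.map (fun k => ((d.get? k).getD (0, 0)).2)

-- get_memtable(stuffdict) with the default A=9
def get_memtable (stuffdict : List (String × Int × Int)) :
    List (List Int) × List Int × List Int :=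
  let d := PySem.Dict.ofList stuffdict
  let area := pvAreaA d
  let value := pvValueA d
  let n := value.length
  let V0 := (PySem.List.pyRange 0 ((n : Int) + 1) 1).map
      (fun _ => (PySem.List.pyRange 0 (9 + 1) 1).map (fun _ => (0 : Int)))
  let V := (PySem.List.pyRange 0 ((n : Int) + 1) 1).foldl (fun V i =>
      (PySem.List.pyRange 0 (9 + 1) 1).foldl (fun V a =>
        if i = 0 ∨ a = 0 then pvSet2 V i a 0
        else if PySem.List.pyGetD area (i - 1) 0 ≤ a then
          pvSet2 V i a (max (PySem.List.pyGetD value (i - 1) 0 +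
              pvGet2 V (i - 1) (a - PySem.List.pyGetD area (i - 1) 0))
            (pvGet2 V (i - 1) a))
        else pvSet2 V i a (pvGet2 V (i - 1) a)) V) V0
  (V, area, value)

-- for i in range(n, 0, -1): … (loop variable = i+1 here; break/continue become returns)
def pvReconA (V : List (List Int)) (area value : List Int) :
    Nat → Int → Int → List (Int × Int) → List (Int × Int)
  | 0, _, _, items => items
  | i + 1, res, a, items =>
    if res ≤ 0 then items
    else if res = pvGet2 V (i : Int) a then pvReconA V area value i res a items
    else pvReconA V area value i (res - PySem.List.pyGetD value (i : Int) 0)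
        (a - PySem.List.pyGetD area (i : Int) 0)
        (items ++ [(PySem.List.pyGetD area (i : Int) 0, PySem.List.pyGetD value (i : Int) 0)])

def get_selected_items_list (stuffdict : List (String × Int × Int)) (A : Int) : List String :=
  let t := get_memtable stuffdict
  let V := t.1
  let area := t.2.1
  let value := t.2.2
  let n := value.length
  let res := pvGet2 V (n : Int) A     -- res = V[n][A]
  let items_list := pvReconA V area value n res A []
  let d := PySem.Dict.ofList stuffdict
  items_list.foldl (fun acc search =>
    d.items.foldl (fun acc kv => if kv.2 = search then acc ++ [kv.1] else acc) acc) []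

-- ===== PORT B =====

-- memoized solve(i, a); the memo dict is threaded through (Python mutates it in place)
def pvSolve (area value : List Int) :
    Nat → Int → PySem.Dict (Int × Int) Int → Int × PySem.Dict (Int × Int) Int
  | 0, _, m => (0, m)
  | i + 1, a, m =>
    if a = 0 then (0, m)
    else
      let m' :=
        if m.contains ((i : Int) + 1, a) then m
        else
          let p := pvSolve area value i a m
          let q :=
            if PySem.List.pyGetD area (i : Int) 0 ≤ a then
              let r := pvSolve area value i (a - PySem.List.pyGetD area (i : Int) 0) p.2
              (max p.1 (PySem.List.pyGetD value (i : Int) 0 + r.1), r.2)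
            else p
          q.2.insert ((i : Int) + 1, a) q.1
      (m'.getD ((i : Int) + 1, a) 0, m')

def pvReconB (area value : List Int) :
    Nat → Int → Int → PySem.Dict (Int × Int) Int → List (Int × Int) →
      List (Int × Int) × PySem.Dict (Int × Int) Int
  | 0, _, _, m, chosen => (chosen, m)
  | i + 1, res, a, m, chosen =>
    if res ≤ 0 then (chosen, m)
    else
      let p := pvSolve area value i a m
      if res = p.1 then pvReconB area value i res a p.2 chosen
      else pvReconB area value i (res - PySem.List.pyGetD value (i : Int) 0)
          (a - PySem.List.pyGetD area (i : Int) 0) p.2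
          (chosen ++ [(PySem.List.pyGetD area (i : Int) 0, PySem.List.pyGetD value (i : Int) 0)])

def get_selected_items_list_alt (stuffdict : List (String × Int × Int)) (A : Int) : List String :=
  let d := PySem.Dict.ofList stuffdict
  let area := d.values.map (·.1)
  let value := d.values.map (·.2)
  let n := area.length
  let p0 := pvSolve area value n A PySem.Dict.empty
  let pr := pvReconB area value n p0.1 A p0.2 []
  pr.1.flatMap (fun t => (d.items.filter (fun kv => kv.2 = t)).map (·.1))

-- ===== PRECONDITION & SPEC =====
-- Pre_ is exactly where A returns: A raises IndexError when the capacity argument A is outside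
-- [-10, 9] (row length is 10) or when some stored item area is negative (table index a - area > 9).
def Pre_get_selected_items_list (stuffdict : List (String × Int × Int)) (A : Int) : Prop :=
  (∀ p ∈ (PySem.Dict.ofList stuffdict).items, 0 ≤ p.2.1) ∧ -10 ≤ A ∧ A ≤ 9
instance (stuffdict : List (String × Int × Int)) (A : Int) :
    Decidable (Pre_get_selected_items_list stuffdict A) := by
  unfold Pre_get_selected_items_list; infer_instance

def pvWitness_get_selected_items_list : (List (String × Int × Int)) × Int :=
  ([("a", 1, 5), ("b", 3, 4)], 9)

-- On -10 ≤ A ≤ -1, A's `V[n][A]` wraps around (negative index) and A returns the selection for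
-- capacity A+10, while B returns [] (no capacity); B's is the intended value for a negative capacity.
def D_get_selected_items_list (stuffdict : List (String × Int × Int)) (A : Int) : Prop :=
  -9 ≤ A ∧ A ≤ -1 ∧
    ∃ p ∈ (PySem.Dict.ofList stuffdict).items, p.2.1 ≤ A + 10 ∧ 0 < p.2.2
instance (stuffdict : List (String × Int × Int)) (A : Int) :
    Decidable (D_get_selected_items_list stuffdict A) := by
  unfold D_get_selected_items_list; infer_instance

def Spec_get_selected_items_list (stuffdict : List (String × Int × Int)) (A : Int)
    (out : List String) : Prop :=
  ¬ D_get_selected_items_list stuffdict A → out = get_selected_items_list_alt stuffdict A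
instance (stuffdict : List (String × Int × Int)) (A : Int) (out : List String) :
    Decidable (Spec_get_selected_items_list stuffdict A out) := by
  unfold Spec_get_selected_items_list; infer_instance

def pvDiffWitness_get_selected_items_list : (List (String × Int × Int)) × Int :=
  ([("a", 1, 5)], -8)
def pvDiffWitnessOut_get_selected_items_list : (List String) × (List String) :=
  (["a"], [])

-- ===== CLAIM (what is proved, stated in full; the proofs are below) =====
def Claim_unchanged_get_selected_items_list : Prop :=
  ∀ (stuffdict : List (String × Int × Int)) (A : Int),
    Dom_get_selected_items_list stuffdict A → Pre_get_selected_items_list stuffdict A →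
      Spec_get_selected_items_list stuffdict A (get_selected_items_list stuffdict A)
def Claim_changed_get_selected_items_list : Prop :=
  Dom_get_selected_items_list (pvDiffWitness_get_selected_items_list.1) (pvDiffWitness_get_selected_items_list.2) ∧
  Pre_get_selected_items_list (pvDiffWitness_get_selected_items_list.1) (pvDiffWitness_get_selected_items_list.2) ∧
  D_get_selected_items_list (pvDiffWitness_get_selected_items_list.1) (pvDiffWitness_get_selected_items_list.2) ∧
  get_selected_items_list (pvDiffWitness_get_selected_items_list.1) (pvDiffWitness_get_selected_items_list.2) = pvDiffWitnessOut_get_selected_items_list.1 ∧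
  get_selected_items_list_alt (pvDiffWitness_get_selected_items_list.1) (pvDiffWitness_get_selected_items_list.2) = pvDiffWitnessOut_get_selected_items_list.2 ∧
  pvDiffWitnessOut_get_selected_items_list.1 ≠ pvDiffWitnessOut_get_selected_items_list.2

-- ===== LEMMAS AND PROOFS =====


-- the mathematical DP both programs compute
def pvSpec (area value : List Int) : Nat → Int → Int
  | 0, _ => 0
  | i + 1, a =>
    if a = 0 then 0
    else if PySem.List.pyGetD area (i : Int) 0 ≤ a then
      max (PySem.List.pyGetD value (i : Int) 0 +
          pvSpec area value i (a - PySem.List.pyGetD area (i : Int) 0))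
        (pvSpec area value i a)
    else pvSpec area value i a

-- all entries of `area` (read through pyGetD, default 0) are nonnegative
def pvHA (area : List Int) : Prop := ∀ j : Nat, 0 ≤ PySem.List.pyGetD area (j : Int) 0

theorem pvSpec_zero (area value : List Int) (i : Nat) : pvSpec area value i 0 = 0 := by
  cases i <;> simp [pvSpec]

theorem pvSpec_nonneg (area value : List Int) (i : Nat) (a : Int) :
    0 ≤ pvSpec area value i a := by
  induction i generalizing a with
  | zero => simp [pvSpec]
  | succ i ih =>
    simp only [pvSpec]
    split_ifs with h1 h2
    · omega
    · exact le_trans (ih a) (le_max_right _ _)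
    · exact ih a

theorem pvSpec_neg (area value : List Int) (hA : pvHA area) (i : Nat) (a : Int) (ha : a < 0) :
    pvSpec area value i a = 0 := by
  induction i with
  | zero => simp [pvSpec]
  | succ i ih =>
    have := hA i
    simp only [pvSpec]
    rw [if_neg (by omega), if_neg (by omega)]
    exact ih

theorem pvSpec_le_zero (area value : List Int) (hA : pvHA area) (a0 : Int)
    (hgood : ∀ j : Nat, PySem.List.pyGetD area (j : Int) 0 ≤ a0 →
      PySem.List.pyGetD value (j : Int) 0 ≤ 0)
    (i : Nat) (a : Int) (ha : a ≤ a0) : pvSpec area value i a ≤ 0 := by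
  induction i generalizing a with
  | zero => simp [pvSpec]
  | succ i ih =>
    simp only [pvSpec]
    split_ifs with h1 h2
    · omega
    · have hv := hgood i (le_trans h2 ha)
      have h3 := ih (a - PySem.List.pyGetD area (i : Int) 0) (by have := hA i; omega)
      have h4 := ih a ha
      omega
    · exact ih a ha

-- characterisation of the take branch: if the DP value strictly improves at row i+1
theorem pvSpec_take (area value : List Int) (i : Nat) (a : Int)
    (hne : pvSpec area value (i + 1) a ≠ pvSpec area value i a) :
    a ≠ 0 ∧ PySem.List.pyGetD area (i : Int) 0 ≤ a ∧
      pvSpec area value (i + 1) a =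
        PySem.List.pyGetD value (i : Int) 0 +
          pvSpec area value i (a - PySem.List.pyGetD area (i : Int) 0) := by
  by_cases h0 : a = 0
  · exfalso; apply hne; subst h0; simp [pvSpec_zero, pvSpec]
  refine ⟨h0, ?_⟩
  by_cases hc : PySem.List.pyGetD area (i : Int) 0 ≤ a
  · refine ⟨hc, ?_⟩
    have hd : pvSpec area value (i + 1) a =
        max (PySem.List.pyGetD value (i : Int) 0 +
          pvSpec area value i (a - PySem.List.pyGetD area (i : Int) 0)) (pvSpec area value i a) := by
      simp only [pvSpec]; rw [if_neg h0, if_pos hc]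
    rcases max_choice (PySem.List.pyGetD value (i : Int) 0 +
        pvSpec area value i (a - PySem.List.pyGetD area (i : Int) 0)) (pvSpec area value i a) with h | h
    · omega
    · exfalso; apply hne; omega
  · exfalso; apply hne; simp only [pvSpec]; rw [if_neg h0, if_neg hc]

-- memo invariant: every cached entry is the DP value
def pvInv (area value : List Int) (m : PySem.Dict (Int × Int) Int) : Prop :=
  ∀ (k : Int × Int) (r : Int), m.get? k = some r →
    ∃ iN : Nat, k.1 = (iN : Int) ∧ r = pvSpec area value iN k.2

theorem pvInv_empty (area value : List Int) : pvInv area value PySem.Dict.empty := by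
  intro k r h; simp [PySem.Dict.get?_empty] at h

theorem pvSolve_spec (area value : List Int) (i : Nat) (a : Int)
    (m : PySem.Dict (Int × Int) Int) (hm : pvInv area value m) :
    (pvSolve area value i a m).1 = pvSpec area value i a ∧
      pvInv area value (pvSolve area value i a m).2 := by
  induction i generalizing a m hm with
  | zero => exact ⟨rfl, hm⟩
  | succ i ih =>
    simp only [pvSolve]
    by_cases h0 : a = 0
    · subst h0
      exact ⟨(pvSpec_zero area value (i + 1)).symm, hm⟩
    · rw [if_neg h0]
      by_cases hc : m.contains ((i : Int) + 1, a)
      · simp only [hc, if_true]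
        have hsome : (m.get? ((i : Int) + 1, a)).isSome := by
          rw [← PySem.Dict.contains_eq_isSome_get?]; exact hc
        obtain ⟨r, hr⟩ := Option.isSome_iff_exists.mp hsome
        obtain ⟨iN, hk, hrs⟩ := hm _ _ hr
        have hiN : iN = i + 1 := by simp at hk; omega
        subst hiN
        constructor
        · rw [PySem.Dict.getD_eq_get?_getD, hr, Option.getD_some, hrs]
        · exact hm
      · simp only [hc, if_false, Bool.false_eq_true]
        have hp := ih a m hm
        by_cases hcc : PySem.List.pyGetD area (i : Int) 0 ≤ a
        · simp only [hcc, if_true]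
          have hr := ih (a - PySem.List.pyGetD area (i : Int) 0) _ hp.2
          have hval : max (pvSolve area value i a m).1
              (PySem.List.pyGetD value (i : Int) 0 +
                (pvSolve area value i (a - PySem.List.pyGetD area (i : Int) 0)
                  (pvSolve area value i a m).2).1) = pvSpec area value (i + 1) a := by
            rw [hp.1, hr.1, max_comm]
            simp only [pvSpec]; rw [if_neg h0, if_pos hcc]
          constructor
          · rw [PySem.Dict.getD_eq_get?_getD, PySem.Dict.get?_insert_self, Option.getD_some, hval]
          · intro k' r' h'
            rw [PySem.Dict.get?_insert] at h'
            split_ifs at h' with hk'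
            · subst hk'
              refine ⟨i + 1, by push_cast; ring, ?_⟩
              simp only [Option.some.injEq] at h'
              rw [← h', hval]
            · exact hr.2 _ _ h'
        · simp only [hcc, if_false]
          have hval : (pvSolve area value i a m).1 = pvSpec area value (i + 1) a := by
            rw [hp.1]; simp only [pvSpec]; rw [if_neg h0, if_neg hcc]
          constructor
          · rw [PySem.Dict.getD_eq_get?_getD, PySem.Dict.get?_insert_self, Option.getD_some, hval]
          · intro k' r' h'
            rw [PySem.Dict.get?_insert] at h'
            split_ifs at h' with hk'
            · subst hk'
              refine ⟨i + 1, by push_cast; ring, ?_⟩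
              simp only [Option.some.injEq] at h'
              rw [← h', hval]
            · exact hp.2 _ _ h'

-- ports agree on the area/value lists
theorem pvAreaA_eq (d : PySem.Dict String (Int × Int)) (hnd : d.keys.Nodup) :
    pvAreaA d = d.values.map (·.1) := by
  rw [PySem.Dict.values_eq_map_keys d hnd (0, 0), List.map_map]
  simp [pvAreaA, Function.comp, PySem.Dict.getD_eq_get?_getD]
theorem pvValueA_eq (d : PySem.Dict String (Int × Int)) (hnd : d.keys.Nodup) :
    pvValueA d = d.values.map (·.2) := by
  rw [PySem.Dict.values_eq_map_keys d hnd (0, 0), List.map_map]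
  simp [pvValueA, Function.comp, PySem.Dict.getD_eq_get?_getD]

-- ===== the table =====
-- the filled part of the table after I complete rows and J cells of row I
def pvRow (area value : List Int) (i : Nat) : List Int :=
  (List.range 10).map (fun a : Nat => pvSpec area value i (a : Int))
def pvPRow (area value : List Int) (i J : Nat) : List Int :=
  (List.range 10).map (fun a : Nat => if a < J then pvSpec area value i (a : Int) else 0)
def pvWst (area value : List Int) (n I J : Nat) : List (List Int) :=
  (List.range (n + 1)).map
    (fun i => if i < I then pvRow area value i else if i = I then pvPRow area value I J else
      (PySem.List.pyRange 0 (9 + 1) 1).map (fun _ => (0 : Int)))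

theorem pvRow_read (area value : List Int) (i : Nat) (a : Int) (h0 : 0 ≤ a) (h9 : a ≤ 9) :
    PySem.List.pyGetD (pvRow area value i) a 0 = pvSpec area value i a := by
  rw [PySem.List.pyGetD_of_nonneg _ _ h0]
  unfold pvRow
  rw [PySem.List.getD_map_range _ _ _ _ (by omega)]
  congr 1
  omega

theorem pvWst_read (area value : List Int) (n I J i0 : Nat) (h : i0 < I) (hn : i0 < n + 1) :
    PySem.List.pyGetD (pvWst area value n I J) (i0 : Int) [] = pvRow area value i0 := by
  unfold pvWst
  rw [PySem.List.pyGetD_natCast, PySem.List.getD_map_range _ _ _ _ hn, if_pos h]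

theorem pvSet_map_range {β : Type} (f : Nat → β) (N k : Nat) (x : β) (hk : k < N) :
    ((List.range N).map f).set k x = (List.range N).map (fun i => if i = k then x else f i) := by
  apply List.ext_getElem
  · simp
  intro j hj1 hj2
  simp only [List.getElem_set, List.getElem_map, List.getElem_range]
  rcases eq_or_ne j k with h | h
  · subst h; simp
  · rw [if_neg (Ne.symm h), if_neg h]

theorem pvPRow_set (area value : List Int) (I J : Nat) (hJ : J < 10) :
    (pvPRow area value I J).set J (pvSpec area value I (J : Int)) = pvPRow area value I (J + 1) := by
  unfold pvPRow
  rw [pvSet_map_range _ _ _ _ hJ]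
  apply List.map_congr_left
  intro a ha
  simp only [List.mem_range] at ha
  rcases eq_or_ne a J with h | h
  · subst h; simp
  · rw [if_neg h]
    by_cases h2 : a < J
    · rw [if_pos h2, if_pos (by omega)]
    · rw [if_neg h2, if_neg (by omega)]

theorem pvSet2_Wst (area value : List Int) (n I J : Nat) (hI : I ≤ n) (hJ : J < 10)
    (x : Int) (hx : x = pvSpec area value I (J : Int)) :
    pvSet2 (pvWst area value n I J) (I : Int) (J : Int) x = pvWst area value n I (J + 1) := by
  unfold pvSet2
  have hrow : PySem.List.pyGetD (pvWst area value n I J) (I : Int) [] = pvPRow area value I J := by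
    unfold pvWst
    rw [PySem.List.pyGetD_natCast, PySem.List.getD_map_range _ _ _ _ (by omega),
      if_neg (lt_irrefl I), if_pos rfl]
  rw [hrow, Int.toNat_natCast, Int.toNat_natCast, hx, pvPRow_set area value I J hJ]
  unfold pvWst
  rw [pvSet_map_range _ _ _ _ (by omega)]
  apply List.map_congr_left
  intro i _
  rcases eq_or_ne i I with h | h
  · subst h; rw [if_pos rfl, if_neg (lt_irrefl i), if_pos rfl]
  · rw [if_neg h]
    by_cases hlt : i < I
    · rw [if_pos hlt, if_pos hlt]
    · rw [if_neg hlt, if_neg hlt, if_neg h, if_neg h]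

theorem pvStep (area value : List Int) (hA : pvHA area) (n I J : Nat)
    (hI : I ≤ n) (hJ : J < 10) :
    (if (I : Int) = 0 ∨ (J : Int) = 0 then pvSet2 (pvWst area value n I J) (I : Int) (J : Int) 0
     else if PySem.List.pyGetD area ((I : Int) - 1) 0 ≤ (J : Int) then
       pvSet2 (pvWst area value n I J) (I : Int) (J : Int)
         (max (PySem.List.pyGetD value ((I : Int) - 1) 0 +
             pvGet2 (pvWst area value n I J) ((I : Int) - 1)
               ((J : Int) - PySem.List.pyGetD area ((I : Int) - 1) 0))
           (pvGet2 (pvWst area value n I J) ((I : Int) - 1) (J : Int)))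
     else pvSet2 (pvWst area value n I J) (I : Int) (J : Int)
       (pvGet2 (pvWst area value n I J) ((I : Int) - 1) (J : Int))) =
    pvWst area value n I (J + 1) := by
  rcases I with _ | I'
  · rw [if_pos (Or.inl (by norm_num))]
    exact pvSet2_Wst area value n 0 J hI hJ 0 (by simp [pvSpec])
  rcases J with _ | J'
  · rw [if_pos (Or.inr (by norm_num))]
    exact pvSet2_Wst area value n (I' + 1) 0 hI hJ 0 (pvSpec_zero area value (I' + 1)).symm
  ·
    rw [if_neg (by push_cast; omega)]
    have hidx : ((I' + 1 : Nat) : Int) - 1 = ((I' : Nat) : Int) := by push_cast; omega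
    rw [hidx]
    have hg : ∀ a' : Int, 0 ≤ a' → a' ≤ 9 →
        pvGet2 (pvWst area value n (I' + 1) (J' + 1)) ((I' : Nat) : Int) a' =
          pvSpec area value I' a' := by
      intro a' h0 h9
      unfold pvGet2
      rw [pvWst_read area value n (I' + 1) (J' + 1) I' (by omega) (by omega),
        pvRow_read area value I' a' h0 h9]
    have hA' := hA I'
    by_cases hc : PySem.List.pyGetD area ((I' : Nat) : Int) 0 ≤ ((J' + 1 : Nat) : Int)
    · rw [if_pos hc, hg _ (by push_cast at hc ⊢; omega) (by push_cast; omega),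
        hg _ (by push_cast; omega) (by push_cast; omega)]
      apply pvSet2_Wst area value n (I' + 1) (J' + 1) hI hJ
      simp only [pvSpec]
      rw [if_neg (by push_cast; omega), if_pos hc]
    · rw [if_neg hc, hg _ (by push_cast; omega) (by push_cast; omega)]
      apply pvSet2_Wst area value n (I' + 1) (J' + 1) hI hJ
      simp only [pvSpec]
      rw [if_neg (by push_cast; omega), if_neg hc]

theorem pvPRow_ten (area value : List Int) (I : Nat) :
    pvPRow area value I 10 = pvRow area value I := by
  unfold pvPRow pvRow
  apply List.map_congr_left
  intro a ha
  simp only [List.mem_range] at ha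
  rw [if_pos ha]

theorem pvPRow_zero (area value : List Int) (I : Nat) :
    pvPRow area value I 0 = (PySem.List.pyRange 0 (9 + 1) 1).map (fun _ => (0 : Int)) := by
  have h10 : ((9 : Int) + 1) = ((10 : Nat) : Int) := by norm_num
  rw [h10, PySem.List.pyRange_zero_natCast, List.map_map]
  unfold pvPRow
  apply List.map_congr_left
  intro a _
  rw [if_neg (by omega)]
  rfl

theorem pvWst_advance (area value : List Int) (n I : Nat) :
    pvWst area value n I 10 = pvWst area value n (I + 1) 0 := by
  unfold pvWst
  apply List.map_congr_left
  intro i _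
  by_cases h1 : i < I
  · rw [if_pos h1, if_pos (by omega)]
  · rcases eq_or_ne i I with h2 | h2
    · subst h2
      rw [if_neg h1, if_pos rfl, if_pos (by omega), pvPRow_ten]
    · rcases eq_or_ne i (I + 1) with h3 | h3
      · subst h3
        rw [if_neg h1, if_neg h2, if_neg (by omega), if_pos rfl, pvPRow_zero]
      · rw [if_neg h1, if_neg h2, if_neg (by omega), if_neg h3]

theorem pvInner (area value : List Int) (hA : pvHA area) (n I : Nat) (hI : I ≤ n) :
    ∀ (K J : Nat), J + K = 10 →
      (PySem.List.pyRange (J : Int) (9 + 1) 1).foldl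
        (fun V a =>
          if (I : Int) = 0 ∨ a = 0 then pvSet2 V (I : Int) a 0
          else if PySem.List.pyGetD area ((I : Int) - 1) 0 ≤ a then
            pvSet2 V (I : Int) a
              (max (PySem.List.pyGetD value ((I : Int) - 1) 0 +
                  pvGet2 V ((I : Int) - 1) (a - PySem.List.pyGetD area ((I : Int) - 1) 0))
                (pvGet2 V ((I : Int) - 1) a))
          else pvSet2 V ((I : Int)) a (pvGet2 V ((I : Int) - 1) a))
        (pvWst area value n I J) = pvWst area value n I 10 := by
  intro K
  induction K with
  | zero =>
    intro J hJ
    have h10 : J = 10 := by omega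
    subst h10
    have hnil : PySem.List.pyRange ((10 : Nat) : Int) (9 + 1) 1 = [] :=
      PySem.List.pyRange_one_eq_nil (by omega)
    rw [hnil]
    rfl
  | succ K ih =>
    intro J hJ
    have hcons : PySem.List.pyRange ((J : Nat) : Int) (9 + 1) 1 =
        ((J : Nat) : Int) :: PySem.List.pyRange (((J : Nat) : Int) + 1) (9 + 1) 1 :=
      PySem.List.pyRange_one_cons (by omega)
    rw [hcons, List.foldl_cons]
    have hstep := pvStep area value hA n I J hI (by omega)
    rw [hstep]
    have hcast : (J : Int) + 1 = ((J + 1 : Nat) : Int) := by push_cast; ring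
    rw [hcast]
    exact ih (J + 1) (by omega)

theorem pvOuter (area value : List Int) (hA : pvHA area) (n : Nat) :
    ∀ (K I : Nat), I + K = n + 1 →
      (PySem.List.pyRange (I : Int) ((n : Int) + 1) 1).foldl
        (fun V i =>
          (PySem.List.pyRange 0 (9 + 1) 1).foldl
            (fun V a =>
              if i = 0 ∨ a = 0 then pvSet2 V i a 0
              else if PySem.List.pyGetD area (i - 1) 0 ≤ a then
                pvSet2 V i a
                  (max (PySem.List.pyGetD value (i - 1) 0 +
                      pvGet2 V (i - 1) (a - PySem.List.pyGetD area (i - 1) 0))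
                    (pvGet2 V (i - 1) a))
              else pvSet2 V i a (pvGet2 V (i - 1) a)) V)
        (pvWst area value n I 0) = pvWst area value n (n + 1) 0 := by
  intro K
  induction K with
  | zero =>
    intro I hI
    have h : I = n + 1 := by omega
    subst h
    have hnil : PySem.List.pyRange (((n + 1 : Nat)) : Int) ((n : Int) + 1) 1 = [] :=
      PySem.List.pyRange_one_eq_nil (by omega)
    rw [hnil]
    rfl
  | succ K ih =>
    intro I hI
    have hcons : PySem.List.pyRange ((I : Nat) : Int) ((n : Int) + 1) 1 =
        ((I : Nat) : Int) :: PySem.List.pyRange (((I : Nat) : Int) + 1) ((n : Int) + 1) 1 :=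
      PySem.List.pyRange_one_cons (by omega)
    rw [hcons, List.foldl_cons]
    have hin := pvInner area value hA n I (by omega) 10 0 rfl
    rw [Nat.cast_zero] at hin
    rw [hin, pvWst_advance]
    have hcast : (I : Int) + 1 = ((I + 1 : Nat) : Int) := by push_cast; ring
    rw [hcast]
    exact ih (I + 1) (by omega)

theorem pvWst_init (area value : List Int) (n : Nat) :
    (PySem.List.pyRange 0 ((n : Int) + 1) 1).map
        (fun _ => (PySem.List.pyRange 0 (9 + 1) 1).map (fun _ => (0 : Int))) =
      pvWst area value n 0 0 := by
  have hcast : (n : Int) + 1 = ((n + 1 : Nat) : Int) := by push_cast; ring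
  rw [hcast, PySem.List.pyRange_zero_natCast, List.map_map]
  unfold pvWst
  apply List.map_congr_left
  intro i _
  rw [if_neg (by omega)]
  rcases eq_or_ne i 0 with h | h
  · subst h
    rw [if_pos rfl]
    unfold pvPRow
    have h10 : ((9 : Int) + 1) = ((10 : Nat) : Int) := by norm_num
    rw [h10, PySem.List.pyRange_zero_natCast, List.map_map]
    apply List.map_congr_left
    intro a _
    rw [if_neg (by omega)]
    rfl
  · rw [if_neg h]
    rfl

theorem pvWst_full (area value : List Int) (n : Nat) :
    pvWst area value n (n + 1) 0 = (List.range (n + 1)).map (pvRow area value) := by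
  unfold pvWst
  apply List.map_congr_left
  intro i hi
  simp only [List.mem_range] at hi
  rw [if_pos hi]

theorem pvTable (stuffdict : List (String × Int × Int))
    (hA : pvHA (get_memtable stuffdict).2.1) :
    (get_memtable stuffdict).1 =
      (List.range ((get_memtable stuffdict).2.2.length + 1)).map
        (pvRow (get_memtable stuffdict).2.1 (get_memtable stuffdict).2.2) := by
  unfold get_memtable at hA ⊢
  dsimp only at hA ⊢
  rw [pvWst_init (pvAreaA (PySem.Dict.ofList stuffdict)) (pvValueA (PySem.Dict.ofList stuffdict))
    (pvValueA (PySem.Dict.ofList stuffdict)).length]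
  have hout := pvOuter (pvAreaA (PySem.Dict.ofList stuffdict))
      (pvValueA (PySem.Dict.ofList stuffdict)) hA (pvValueA (PySem.Dict.ofList stuffdict)).length
      ((pvValueA (PySem.Dict.ofList stuffdict)).length + 1) 0 (by omega)
  rw [Nat.cast_zero] at hout
  rw [hout, pvWst_full]

-- reading the finished table
theorem pvGet2_table (area value : List Int) (n : Nat)
    (V : List (List Int)) (hV : V = (List.range (n + 1)).map (pvRow area value))
    (i : Nat) (hi : i ≤ n) (a : Int) (ha : 0 ≤ a) (ha9 : a ≤ 9) :
    pvGet2 V (i : Int) a = pvSpec area value i a := by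
  subst hV
  unfold pvGet2
  rw [PySem.List.pyGetD_natCast, PySem.List.getD_map_range _ _ _ _ (by omega),
    PySem.List.pyGetD_of_nonneg _ _ ha]
  unfold pvRow
  rw [PySem.List.getD_map_range _ _ _ _ (by omega)]
  congr 1
  omega

theorem pvGet2_table_neg (area value : List Int) (n : Nat)
    (V : List (List Int)) (hV : V = (List.range (n + 1)).map (pvRow area value))
    (i : Nat) (hi : i ≤ n) (a : Int) (ha : -10 ≤ a) (ha9 : a < 0) :
    pvGet2 V (i : Int) a = pvSpec area value i (a + 10) := by
  subst hV
  unfold pvGet2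
  rw [PySem.List.pyGetD_natCast, PySem.List.getD_map_range _ _ _ _ (by omega)]
  have hk : a = -((-a).toNat : Int) := by omega
  have hlen : (pvRow area value i).length = 10 := by simp [pvRow]
  have hdef : PySem.List.pyGetD (pvRow area value i) a 0 =
      (PySem.List.pyGet? (pvRow area value i) a).getD 0 := by
    simp [PySem.List.pyGetD, PySem.List.pyGet?]
  rw [hdef, hk, PySem.List.pyGet?_neg_natCast _ _ (by omega) (by omega)]
  unfold pvRow
  rw [List.getElem?_map]
  rw [List.getElem?_range (by simp [hlen] at *; omega)]
  simp only [Option.map_some, Option.getD_some]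
  congr 1
  simp [pvRow] at hlen ⊢
  omega

-- ===== reconstruction =====
def pvReconS (area value : List Int) : Nat → Int → Int → List (Int × Int) → List (Int × Int)
  | 0, _, _, items => items
  | i + 1, res, a, items =>
    if res ≤ 0 then items
    else if res = pvSpec area value i a then pvReconS area value i res a items
    else pvReconS area value i (res - PySem.List.pyGetD value (i : Int) 0)
        (a - PySem.List.pyGetD area (i : Int) 0)
        (items ++ [(PySem.List.pyGetD area (i : Int) 0, PySem.List.pyGetD value (i : Int) 0)])

theorem pvReconA_eq (area value : List Int) (hA : pvHA area) (n : Nat)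
    (V : List (List Int)) (hV : V = (List.range (n + 1)).map (pvRow area value)) :
    ∀ (i : Nat), i ≤ n → ∀ (res a : Int) (items : List (Int × Int)),
      res = pvSpec area value i a → 0 ≤ a → a ≤ 9 →
      pvReconA V area value i res a items = pvReconS area value i res a items := by
  intro i
  induction i with
  | zero => intro _ res a items _ _ _; rfl
  | succ i ih =>
    intro hi res a items hres ha0 ha9
    unfold pvReconA pvReconS
    by_cases hstop : res ≤ 0
    · rw [if_pos hstop, if_pos hstop]
    rw [if_neg hstop, if_neg hstop]
    have hlook : pvGet2 V (i : Int) a = pvSpec area value i a :=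
      pvGet2_table area value n V hV i (by omega) a ha0 ha9
    rw [hlook]
    by_cases hsk : res = pvSpec area value i a
    · rw [if_pos hsk, if_pos hsk]
      exact ih (by omega) res a items hsk ha0 ha9
    · rw [if_neg hsk, if_neg hsk]
      have hne : pvSpec area value (i + 1) a ≠ pvSpec area value i a := by
        rw [← hres]; exact hsk
      obtain ⟨-, har, htake⟩ := pvSpec_take area value i a hne
      have hA0 := hA i
      exact ih (by omega) _ _ _ (by omega) (by omega) (by omega)

theorem pvReconB_eq (area value : List Int) :
    ∀ (i : Nat) (res a : Int) (m : PySem.Dict (Int × Int) Int) (items : List (Int × Int)),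
      pvInv area value m →
      (pvReconB area value i res a m items).1 = pvReconS area value i res a items := by
  intro i
  induction i with
  | zero => intro res a m items _; rfl
  | succ i ih =>
    intro res a m items hm
    unfold pvReconB pvReconS
    by_cases hstop : res ≤ 0
    · rw [if_pos hstop, if_pos hstop]
    rw [if_neg hstop, if_neg hstop]
    obtain ⟨h1, h2⟩ := pvSolve_spec area value i a m hm
    dsimp only
    rw [h1]
    by_cases hsk : res = pvSpec area value i a
    · rw [if_pos hsk, if_pos hsk]
      exact ih res a _ items h2
    · rw [if_neg hsk, if_neg hsk]
      exact ih _ _ _ _ h2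

theorem pvReconA_stop (V : List (List Int)) (area value : List Int) (i : Nat)
    (res a : Int) (items : List (Int × Int)) (h : res ≤ 0) :
    pvReconA V area value i res a items = items := by
  cases i <;> simp [pvReconA, h]

theorem pvReconB_stop (area value : List Int) (i : Nat) (res a : Int)
    (m : PySem.Dict (Int × Int) Int) (chosen : List (Int × Int)) (h : res ≤ 0) :
    (pvReconB area value i res a m chosen).1 = chosen := by
  cases i <;> simp [pvReconB, h]

-- ===== final pass =====
theorem pvFinal (l : List (String × Int × Int)) (items : List (Int × Int)) (acc : List String) :
    items.foldl (fun acc search =>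
        l.foldl (fun acc kv => if kv.2 = search then acc ++ [kv.1] else acc) acc) acc =
      acc ++ items.flatMap (fun t => (l.filter (fun kv => kv.2 = t)).map (·.1)) := by
  induction items generalizing acc with
  | nil => simp
  | cons t ts ih =>
    simp only [List.foldl_cons, List.flatMap_cons, ih]
    have hconv : (fun (acc : List String) (kv : String × Int × Int) =>
        if kv.2 = t then acc ++ [kv.1] else acc) =
        (fun acc kv => if (fun kv : String × Int × Int => kv.2 == t) kv = true
          then acc ++ [(fun kv : String × Int × Int => kv.1) kv] else acc) := by
      funext acc kv
      simp [beq_iff_eq]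
    rw [hconv, PySem.List.foldl_append_if, List.append_assoc]
    have hf : l.filter (fun kv : String × Int × Int => kv.2 == t) =
        l.filter (fun kv : String × Int × Int => kv.2 = t) := by
      apply List.filter_congr
      intro x _
      rw [Bool.eq_iff_iff]
      simp
    rw [hf]

-- ===== VERDICT (by name: the statement is the Claim_ definition above) =====
theorem get_selected_items_list_spec : Claim_unchanged_get_selected_items_list := by
  intro sd A hdom hpre hnd
  obtain ⟨hpre1, hA1, hA2⟩ := hpre
  have hndk := PySem.Dict.nodup_keys_ofList sd
  have harea : pvAreaA (PySem.Dict.ofList sd) = (PySem.Dict.ofList sd).values.map (·.1) :=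
    pvAreaA_eq _ hndk
  have hvalue : pvValueA (PySem.Dict.ofList sd) = (PySem.Dict.ofList sd).values.map (·.2) :=
    pvValueA_eq _ hndk
  have hHA : pvHA (pvAreaA (PySem.Dict.ofList sd)) := by
    intro j
    rw [harea, PySem.List.pyGetD_natCast]
    by_cases hj : j < ((PySem.Dict.ofList sd).values.map (·.1)).length
    · rw [List.getD_eq_getElem _ _ hj]
      simp only [List.getElem_map]
      have hmem : (PySem.Dict.ofList sd).values[j]'(by simpa using hj) ∈
          (PySem.Dict.ofList sd).values := List.getElem_mem _
      simp only [PySem.Dict.values] at hmem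
      obtain ⟨p, hp, hpe⟩ := List.mem_map.mp hmem
      simp only [PySem.Dict.values]
      rw [← hpe]
      exact hpre1 p hp
    · rw [List.getD_eq_default _ _ (by omega)]
  have h21 : (get_memtable sd).2.1 = pvAreaA (PySem.Dict.ofList sd) := rfl
  have h22 : (get_memtable sd).2.2 = pvValueA (PySem.Dict.ofList sd) := rfl
  have hlen : (pvAreaA (PySem.Dict.ofList sd)).length = (pvValueA (PySem.Dict.ofList sd)).length := by
    simp [pvAreaA, pvValueA]
  have hT := pvTable sd (by rw [h21]; exact hHA)
  rw [h21, h22] at hT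
  show get_selected_items_list sd A = get_selected_items_list_alt sd A
  unfold get_selected_items_list get_selected_items_list_alt
  dsimp only
  rw [h21, h22, hT, ← harea, ← hvalue, hlen]
  by_cases h0 : 0 ≤ A
  · have hres := pvGet2_table (pvAreaA (PySem.Dict.ofList sd)) (pvValueA (PySem.Dict.ofList sd))
      (pvValueA (PySem.Dict.ofList sd)).length _ rfl
      (pvValueA (PySem.Dict.ofList sd)).length le_rfl A h0 hA2
    have hsol := pvSolve_spec (pvAreaA (PySem.Dict.ofList sd)) (pvValueA (PySem.Dict.ofList sd))
      (pvValueA (PySem.Dict.ofList sd)).length A PySem.Dict.empty (pvInv_empty _ _)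
    rw [hres, hsol.1]
    rw [pvReconA_eq (pvAreaA (PySem.Dict.ofList sd)) (pvValueA (PySem.Dict.ofList sd)) hHA
      (pvValueA (PySem.Dict.ofList sd)).length _ rfl (pvValueA (PySem.Dict.ofList sd)).length le_rfl
      _ A [] rfl h0 hA2]
    rw [pvReconB_eq (pvAreaA (PySem.Dict.ofList sd)) (pvValueA (PySem.Dict.ofList sd))
      (pvValueA (PySem.Dict.ofList sd)).length _ A _ [] hsol.2]
    rw [pvFinal]
    simp only [List.nil_append]
  · have hres := pvGet2_table_neg (pvAreaA (PySem.Dict.ofList sd)) (pvValueA (PySem.Dict.ofList sd))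
      (pvValueA (PySem.Dict.ofList sd)).length _ rfl
      (pvValueA (PySem.Dict.ofList sd)).length le_rfl A hA1 (by omega)
    have hzero : pvSpec (pvAreaA (PySem.Dict.ofList sd)) (pvValueA (PySem.Dict.ofList sd))
        (pvValueA (PySem.Dict.ofList sd)).length (A + 10) = 0 := by
      by_cases h9 : -9 ≤ A
      · have hne : ¬ ∃ p ∈ (PySem.Dict.ofList sd).items, p.2.1 ≤ A + 10 ∧ 0 < p.2.2 := by
          intro hex
          exact hnd ⟨h9, by omega, hex⟩
        push Not at hne
        apply le_antisymm
        · apply pvSpec_le_zero _ _ hHA (A + 10) ?_ _ _ le_rfl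
          intro j hj
          by_cases hjl : j < (pvValueA (PySem.Dict.ofList sd)).length
          · rw [hvalue, PySem.List.pyGetD_natCast, List.getD_eq_getElem _ _ (by
              rw [← hvalue]; simpa [pvAreaA, pvValueA] using hjl)]
            rw [harea, PySem.List.pyGetD_natCast, List.getD_eq_getElem _ _ (by
              rw [← harea]; rwa [hlen])] at hj
            simp only [List.getElem_map, PySem.Dict.values] at hj ⊢
            have hmem : (PySem.Dict.ofList sd).items[j]'(by
                simpa [pvValueA, PySem.Dict.keys] using hjl) ∈ (PySem.Dict.ofList sd).items :=
              List.getElem_mem _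
            have := hne _ hmem
            omega
          · rw [hvalue, PySem.List.pyGetD_natCast, List.getD_eq_default _ _ (by
              rw [← hvalue]; simpa [pvAreaA, pvValueA] using hjl)]
        · exact pvSpec_nonneg _ _ _ _
      · have hA10 : A = -10 := by omega
        subst hA10
        norm_num [pvSpec_zero]
    have hsolv : (pvSolve (pvAreaA (PySem.Dict.ofList sd)) (pvValueA (PySem.Dict.ofList sd))
        (pvValueA (PySem.Dict.ofList sd)).length A PySem.Dict.empty).1 = 0 := by
      rw [(pvSolve_spec _ _ _ A PySem.Dict.empty (pvInv_empty _ _)).1]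
      exact pvSpec_neg _ _ hHA _ A (by omega)
    rw [hres, hzero, hsolv]
    rw [pvReconA_stop _ _ _ _ _ _ _ le_rfl, pvReconB_stop _ _ _ _ _ _ _ le_rfl]
    simp

theorem get_selected_items_list_changed : Claim_changed_get_selected_items_list := by
  unfold Claim_changed_get_selected_items_list; decide
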